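-- pv_equiv track=rewrite | github.com/Yeony54/Python_Algorithm_Notes | baekjoon/1284.py | solution
-- ===== SOURCE A (Python) =====
-- def solution(num):
--     res = 1
--     for n in str(num):
--         if n == '1':
--             res += 3
--         elif n == '0':
--             res += 5
--         else: res += 4
--
--     return res
-- ===== SOURCE B (Python) =====
-- def solution(num):
--     # closed form: every character is worth 4, except '1' (3) and '0' (5); plus 1 leading margin
--     s = str(num)
--     return 1 + 4 * len(s) + s.count('0') - s.count('1')
-- ===== Notes on version B (the rewrite author's own statement) =====
-- stated objective: simpler
-- what changed: Replaced the accumulating per-character branch loop by a closed-form arithmetic expression 1 + 4*len(s) + s.count('0') - s.count('1') over the decimal string.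
import Mathlib
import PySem

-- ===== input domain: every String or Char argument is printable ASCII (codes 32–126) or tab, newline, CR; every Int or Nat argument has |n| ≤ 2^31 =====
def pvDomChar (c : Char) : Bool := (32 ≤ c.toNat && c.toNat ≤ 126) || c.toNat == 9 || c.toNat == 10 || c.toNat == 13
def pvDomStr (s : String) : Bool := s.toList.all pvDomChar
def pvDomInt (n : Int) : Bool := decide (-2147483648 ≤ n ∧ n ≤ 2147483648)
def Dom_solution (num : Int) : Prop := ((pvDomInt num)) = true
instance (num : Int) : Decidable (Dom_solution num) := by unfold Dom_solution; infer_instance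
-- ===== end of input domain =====

-- B replaces A's accumulating branch loop by a closed-form expression over the length and digit counts of str(num).

-- ===== PORT A =====
def solution (num : Int) : Int :=
  (PySem.Int.toStr num).toList.foldl
    (fun res n => if n = '1' then res + 3 else if n = '0' then res + 5 else res + 4) 1

-- ===== PORT B =====
def solution_alt (num : Int) : Int :=
  let s := PySem.Int.toStr num
  1 + 4 * (PySem.Str.len s : Int) + (PySem.Str.count s "0" : Int) - (PySem.Str.count s "1" : Int)

-- ===== PRECONDITION & SPEC =====
def Spec_solution (num : Int) (out : Int) : Prop := out = solution_alt num
instance (num : Int) (out : Int) : Decidable (Spec_solution num out) := by unfold Spec_solution; infer_instance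

-- ===== CLAIM (what is proved, stated in full; the proofs are below) =====
def Claim_equal_solution : Prop := ∀ (num : Int), Dom_solution num → Spec_solution num (solution num)

-- ===== LEMMAS AND PROOFS =====

-- single-character substring count coincides with List.count
lemma chars_count_go_single (c : Char) :
    ∀ (l : List Char) (acc : Nat), PySem.Chars.count.go [c] l.length l acc = acc + l.count c := by
  intro l
  induction l with
  | nil => intro acc; simp [PySem.Chars.count.go]
  | cons h t ih =>
      intro acc
      show PySem.Chars.count.go [c] (t.length + 1) (h :: t) acc = _
      rw [PySem.Chars.count.go]
      by_cases hc : h = c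
      · subst hc
        simp [List.isPrefixOf, ih]
        omega
      · simp [List.isPrefixOf, hc, ih, Ne.symm hc]

lemma chars_count_single (cs : List Char) (c : Char) :
    PySem.Chars.count cs [c] = cs.count c := by
  simp [PySem.Chars.count, chars_count_go_single]

-- A's loop in closed form
lemma foldl_width (cs : List Char) (a : Int) :
    cs.foldl (fun res n => if n = '1' then res + 3 else if n = '0' then res + 5 else res + 4) a
      = a + 4 * cs.length + cs.count '0' - cs.count '1' := by
  induction cs generalizing a with
  | nil => simp
  | cons h t ih =>
      simp only [List.foldl_cons, ih, List.count_cons, List.length_cons]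
      by_cases h1 : h = '1'
      · subst h1; simp; ring
      · by_cases h0 : h = '0'
        · subst h0; simp [h1]; ring
        · simp [h1, h0]; ring

-- ===== VERDICT (by name: the statement is the Claim_ definition above) =====
theorem solution_spec : Claim_equal_solution := by
  intro num _
  show solution num = solution_alt num
  simp only [solution, solution_alt, foldl_width, PySem.Str.count_eq, PySem.Str.len_eq]
  rw [show ("0" : String).toList = ['0'] from rfl, show ("1" : String).toList = ['1'] from rfl]
  simp [chars_count_single]
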